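-- pv_equiv track=rewrite | github.com/lijianqiao/ncm | backend/app/network/templates/__init__.py | _parse_template_filename
-- ===== SOURCE A (Python) =====
-- def _parse_template_filename(filename: str) -> tuple[str, str] | None:
--     """
--     从模板文件名解析平台和命令。
--
--     文件名格式：{platform}_{command}.textfsm
--     例如：hp_comware_display_version.textfsm
--
--     Args:
--         filename: 模板文件名（不含路径）
--
--     Returns:
--         tuple[str, str] | None: (平台, 命令键) 或 None
--     """
--     if not filename.endswith(".textfsm"):
--         return None
--
--     # 移除扩展名
--     name = filename[:-8]  # 移除 ".textfsm"
--
--     # 已知平台前缀列表（按长度降序排列，确保优先匹配最长的）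
--     known_platforms = [
--         "juniper_junos",
--         "cisco_iosxe",
--         "cisco_nxos",
--         "arista_eos",
--         "huawei_vrp",
--         "hp_comware",
--         "cisco_ios",
--     ]
--
--     for platform in known_platforms:
--         if name.startswith(f"{platform}_"):
--             command_key = name[len(platform) + 1 :]  # +1 for underscore
--             return platform, command_key
--
--     return None
-- ===== SOURCE B (Python) =====
-- _PLATFORMS = {
--     "juniper_junos",
--     "cisco_iosxe",
--     "cisco_nxos",
--     "arista_eos",
--     "huawei_vrp",
--     "hp_comware",
--     "cisco_ios",
-- }
--
--
-- def _parse_template_filename(filename: str) -> tuple[str, str] | None: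
--     if not filename.endswith(".textfsm"):
--         return None
--     name = filename[:-8]
--     # every known platform is "vendor_os": cut at the second underscore
--     sep = name.find("_", name.find("_") + 1)
--     if sep == -1:
--         return None
--     platform = name[:sep]
--     if platform in _PLATFORMS:
--         return platform, name[sep + 1:]
--     return None
-- ===== Notes on version B (the rewrite author's own statement) =====
-- stated objective: idiomatic
-- what changed: Instead of scanning the fixed platform list with startswith, B cuts the name at its second underscore (every known platform is vendor_os) and does a single set-membership lookup.
import Mathlib
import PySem

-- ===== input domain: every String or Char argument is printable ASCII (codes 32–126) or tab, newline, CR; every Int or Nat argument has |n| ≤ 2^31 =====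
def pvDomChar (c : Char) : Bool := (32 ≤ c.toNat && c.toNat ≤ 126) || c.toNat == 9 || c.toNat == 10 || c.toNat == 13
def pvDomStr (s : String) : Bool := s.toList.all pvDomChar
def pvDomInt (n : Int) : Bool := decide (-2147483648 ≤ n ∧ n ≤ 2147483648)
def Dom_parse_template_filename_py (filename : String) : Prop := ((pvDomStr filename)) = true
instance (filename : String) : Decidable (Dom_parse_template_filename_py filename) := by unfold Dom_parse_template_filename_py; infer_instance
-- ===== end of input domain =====

-- B replaces A's startswith scan over the 7-platform list by cutting the name at its second
-- underscore (every known platform is "vendor_os") and one set-membership lookup (idiomatic, not faster).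

-- ===== PORT A =====
def pvKnownPlatforms : List String :=
  ["juniper_junos", "cisco_iosxe", "cisco_nxos", "arista_eos", "huawei_vrp", "hp_comware", "cisco_ios"]

-- the `for platform in known_platforms` loop of A
def pvLoopA (name : List Char) : List String → Option (String × String)
  | [] => none
  | p :: rest =>
    if PySem.Chars.startswith name (p.toList ++ ['_']) = true then
      some (p, String.ofList (PySem.Chars.slice name (some (PySem.Str.len p + 1)) none))
    else pvLoopA name rest

def parse_template_filename_py (filename : String) : Option (String × String) :=
  if PySem.Str.endswith filename ".textfsm" = true then
    pvLoopA (PySem.Chars.slice filename.toList none (some (-8))) pvKnownPlatforms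
  else none

-- ===== PORT B =====
def pvPlatformSet : PySem.Set String :=
  PySem.Set.ofList
    ["juniper_junos", "cisco_iosxe", "cisco_nxos", "arista_eos", "huawei_vrp", "hp_comware", "cisco_ios"]

def parse_template_filename_py_alt (filename : String) : Option (String × String) :=
  if PySem.Str.endswith filename ".textfsm" = true then
    let name := PySem.Chars.slice filename.toList none (some (-8))
    let sep := PySem.Chars.findFrom name ['_'] (PySem.Chars.find name ['_'] + 1)
    if sep = -1 then none
    else
      let platform := String.ofList (PySem.Chars.slice name none (some sep))
      if pvPlatformSet.contains platform = true then
        some (platform, String.ofList (PySem.Chars.slice name (some (sep + 1)) none))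
      else none
  else none

-- ===== PRECONDITION & SPEC =====
def Spec_parse_template_filename_py (filename : String) (out : Option (String × String)) : Prop := out = parse_template_filename_py_alt filename
instance (filename : String) (out : Option (String × String)) : Decidable (Spec_parse_template_filename_py filename out) := by unfold Spec_parse_template_filename_py; infer_instance

-- ===== CLAIM (what is proved, stated in full; the proofs are below) =====
def Claim_equal_parse_template_filename_py : Prop := ∀ (filename : String), Dom_parse_template_filename_py filename → Spec_parse_template_filename_py filename (parse_template_filename_py filename)

-- ===== LEMMAS AND PROOFS =====

-- every list of chars either has no '_' or splits at its first '_'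
theorem pv_decomp (l : List Char) : '_' ∉ l ∨ ∃ a t, l = a ++ '_' :: t ∧ '_' ∉ a := by
  induction l with
  | nil => exact Or.inl (by simp)
  | cons c l ih =>
    by_cases hc : c = '_'
    · exact Or.inr ⟨[], l, by simp [hc], by simp⟩
    · rcases ih with h | ⟨a, t, rfl, ha⟩
      · exact Or.inl (by simp [h, Ne.symm hc])
      · exact Or.inr ⟨c :: a, t, rfl, by simp [ha, Ne.symm hc]⟩

theorem pv_find_no {s : List Char} (h : '_' ∉ s) : PySem.Chars.find s ['_'] = -1 := by
  rw [PySem.Chars.find_eq_neg_one_iff]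
  intro hinf
  exact h (hinf.mem (by simp))

theorem pv_find_at (a t : List Char) (ha : '_' ∉ a) :
    PySem.Chars.find (a ++ '_' :: t) ['_'] = (a.length : Int) := by
  have hinf : ['_'] <:+: (a ++ '_' :: t) := ⟨a, t, by simp⟩
  have hnn : 0 ≤ PySem.Chars.find (a ++ '_' :: t) ['_'] :=
    (PySem.Chars.find_nonneg_iff _ _).mpr hinf
  obtain ⟨hpre, hmin⟩ := PySem.Chars.find_spec hnn
  set k := (PySem.Chars.find (a ++ '_' :: t) ['_']).toNat with hk
  have hk_le : k ≤ a.length := by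
    by_contra hgt
    push_neg at hgt
    exact hmin a.length hgt ⟨t, by simp⟩
  have hk_ge : a.length ≤ k := by
    by_contra hlt
    push_neg at hlt
    obtain ⟨u, hu⟩ := hpre
    have hd : List.drop k (a ++ '_' :: t) = List.drop k a ++ '_' :: t :=
      List.drop_append_of_le_length (le_of_lt hlt)
    cases hda : List.drop k a with
    | nil => exact absurd (List.drop_eq_nil_iff.mp hda) (by omega)
    | cons c w =>
      have hcd : c ∈ List.drop k a := by simp [hda]
      have hc : c ∈ a := List.mem_of_mem_drop hcd
      rw [hd, hda] at hu
      simp at hu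
      exact ha (hu.1 ▸ hc)
  have : k = a.length := le_antisymm hk_le hk_ge
  omega

theorem pv_seg_pref : ∀ (x a u v : List Char), '_' ∉ x → '_' ∉ a →
    (x ++ '_' :: u <+: a ++ '_' :: v) → x = a ∧ u <+: v := by
  intro x
  induction x with
  | nil =>
    intro a u v _ ha h
    cases a with
    | nil => simpa using h
    | cons c a' =>
      simp only [List.nil_append, List.cons_append, List.cons_prefix_cons] at h
      exact absurd (h.1 ▸ List.mem_cons_self) ha
  | cons c x' ih =>
    intro a u v hx ha h
    cases a with
    | nil =>
      simp only [List.cons_append, List.nil_append, List.cons_prefix_cons] at h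
      exact absurd (h.1 ▸ List.mem_cons_self) hx
    | cons d a' =>
      simp only [List.cons_append, List.cons_prefix_cons] at h
      obtain ⟨rfl, h2⟩ := h
      have := ih a' u v (fun hm => hx (List.mem_cons_of_mem _ hm))
        (fun hm => ha (List.mem_cons_of_mem _ hm)) h2
      exact ⟨by rw [this.1], this.2⟩

theorem pv_seg_eq {x a u v : List Char} (hx : '_' ∉ x) (ha : '_' ∉ a)
    (h : x ++ '_' :: u = a ++ '_' :: v) : x = a ∧ u = v := by
  obtain ⟨rfl, _⟩ := pv_seg_pref x a u v hx ha (h ▸ List.prefix_refl _)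
  refine ⟨rfl, ?_⟩
  have := List.append_cancel_left h
  simpa using this

theorem pv_key_prefix {x y a b : List Char} (r : List Char)
    (hx : '_' ∉ x) (hy : '_' ∉ y) (ha : '_' ∉ a) (hb : '_' ∉ b) :
    (x ++ '_' :: (y ++ ['_'])) <+: (a ++ '_' :: (b ++ '_' :: r)) ↔ (x = a ∧ y = b) := by
  constructor
  · intro h
    obtain ⟨rfl, h2⟩ := pv_seg_pref x a (y ++ ['_']) (b ++ '_' :: r) hx ha h
    have h3 : y ++ '_' :: ([] : List Char) <+: b ++ '_' :: r := by simpa using h2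
    obtain ⟨rfl, _⟩ := pv_seg_pref y b [] r hy hb h3
    exact ⟨rfl, rfl⟩
  · rintro ⟨rfl, rfl⟩
    exact ⟨r, by simp⟩

def pvTwoTok (p : String) : Prop := ∃ x y, p.toList = x ++ '_' :: y ∧ '_' ∉ x ∧ '_' ∉ y

theorem pv_platforms_twotok : ∀ p ∈ pvKnownPlatforms, pvTwoTok p := by
  intro p hp
  simp only [pvKnownPlatforms, List.mem_cons, List.not_mem_nil, or_false] at hp
  rcases hp with rfl | rfl | rfl | rfl | rfl | rfl | rfl
  · exact ⟨"juniper".toList, "junos".toList, by decide, by decide, by decide⟩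
  · exact ⟨"cisco".toList, "iosxe".toList, by decide, by decide, by decide⟩
  · exact ⟨"cisco".toList, "nxos".toList, by decide, by decide, by decide⟩
  · exact ⟨"arista".toList, "eos".toList, by decide, by decide, by decide⟩
  · exact ⟨"huawei".toList, "vrp".toList, by decide, by decide, by decide⟩
  · exact ⟨"hp".toList, "comware".toList, by decide, by decide, by decide⟩
  · exact ⟨"cisco".toList, "ios".toList, by decide, by decide, by decide⟩

-- A's loop returns none when the name has fewer than two underscores
theorem pv_loopA_small {name : List Char} (hc : name.count '_' < 2) :
    ∀ ps : List String, (∀ p ∈ ps, pvTwoTok p) → pvLoopA name ps = none := by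
  intro ps
  induction ps with
  | nil => intro _; rfl
  | cons p rest ih =>
    intro hall
    obtain ⟨x, y, hp, hx, hy⟩ := hall p List.mem_cons_self
    have hfalse : ¬ PySem.Chars.startswith name (p.toList ++ ['_']) = true := by
      rw [PySem.Chars.startswith_iff]
      intro hpre
      have hsub := hpre.sublist.count_le '_'
      rw [hp] at hsub
      have : List.count '_' (x ++ '_' :: y ++ ['_']) = 2 := by
        simp [List.count_append, List.count_eq_zero.mpr hx, List.count_eq_zero.mpr hy]
      omega
    rw [pvLoopA, if_neg hfalse]
    exact ih (fun q hq => hall q (List.mem_cons_of_mem _ hq))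

-- A's loop on a name with at least two underscores is a first-match lookup of the two-token prefix
theorem pv_loopA_two {a b : List Char} (r : List Char) (ha : '_' ∉ a) (hb : '_' ∉ b) :
    ∀ ps : List String, (∀ p ∈ ps, pvTwoTok p) →
    pvLoopA (a ++ '_' :: (b ++ '_' :: r)) ps =
      match ps.find? (fun p => p.toList == a ++ '_' :: b) with
      | some p => some (p, String.ofList r)
      | none => none := by
  intro ps
  induction ps with
  | nil => intro _; rfl
  | cons p rest ih =>
    intro hall
    obtain ⟨x, y, hp, hx, hy⟩ := hall p List.mem_cons_self
    have hcond : PySem.Chars.startswith (a ++ '_' :: (b ++ '_' :: r)) (p.toList ++ ['_']) = true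
        ↔ p.toList = a ++ '_' :: b := by
      rw [PySem.Chars.startswith_iff, hp]
      have hassoc : (x ++ '_' :: y) ++ ['_'] = x ++ '_' :: (y ++ ['_']) := by simp
      rw [hassoc, pv_key_prefix r hx hy ha hb]
      constructor
      · rintro ⟨rfl, rfl⟩; rfl
      · intro h; exact pv_seg_eq hx ha h
    rw [pvLoopA, List.find?_cons]
    by_cases hmatch : p.toList = a ++ '_' :: b
    · rw [if_pos (hcond.mpr hmatch)]
      rw [beq_iff_eq.mpr hmatch]
      have hlen : PySem.Str.len p + 1 = ((a.length + 1 + b.length + 1 : Nat) : Int) := by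
        rw [PySem.Str.len_eq, hmatch]
        push_cast
        simp
        ring
      have hdrop : PySem.Chars.slice (a ++ '_' :: (b ++ '_' :: r))
          (some (PySem.Str.len p + 1)) none = r := by
        rw [PySem.Chars.slice_eq_listSlice, hlen, PySem.List.slice_from _ (by positivity)]
        have hsplit : a ++ '_' :: (b ++ '_' :: r) = (a ++ '_' :: b ++ ['_']) ++ r := by simp
        rw [hsplit]
        have hl : ((a.length + 1 + b.length + 1 : Nat) : Int).toNat = (a ++ '_' :: b ++ ['_']).length := by
          simp
          omega
        rw [hl, List.drop_left]
      rw [hdrop]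
    · rw [if_neg (fun hh => hmatch (hcond.mp hh))]
      rw [beq_eq_false_iff_ne.mpr hmatch]
      exact ih (fun q hq => hall q (List.mem_cons_of_mem _ hq))

-- the two cores agree on every stripped name
theorem pv_core (name : List Char) :
    pvLoopA name pvKnownPlatforms =
      (let sep := PySem.Chars.findFrom name ['_'] (PySem.Chars.find name ['_'] + 1)
       if sep = -1 then none
       else
         let platform := String.ofList (PySem.Chars.slice name none (some sep))
         if pvPlatformSet.contains platform = true then
           some (platform, String.ofList (PySem.Chars.slice name (some (sep + 1)) none))
         else none) := by
  rcases pv_decomp name with h1 | ⟨a, t, rfl, ha⟩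
  · -- no underscore at all: both none
    have hf : PySem.Chars.find name ['_'] = -1 := pv_find_no h1
    have h0 : PySem.Chars.find name ['_'] + 1 = ((0 : Nat) : Int) := by rw [hf]; norm_num
    have hsep : PySem.Chars.findFrom name ['_'] (PySem.Chars.find name ['_'] + 1) = -1 := by
      rw [h0, PySem.Chars.findFrom_natCast name ['_'] 0 (by simp)]
      simp [hf]
    simp only [hsep]
    exact pv_loopA_small (by rw [List.count_eq_zero.mpr h1]; omega) _ pv_platforms_twotok
  · rcases pv_decomp t with h2 | ⟨b, r, rfl, hb⟩
    · -- exactly one underscore: both none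
      have hf : PySem.Chars.find (a ++ '_' :: t) ['_'] = (a.length : Int) := pv_find_at a t ha
      have h1 : PySem.Chars.find (a ++ '_' :: t) ['_'] + 1 = ((a.length + 1 : Nat) : Int) := by
        rw [hf]; push_cast; ring
      have hdrop : List.drop (a.length + 1) (a ++ '_' :: t) = t := by
        have : a ++ '_' :: t = (a ++ ['_']) ++ t := by simp
        rw [this, List.drop_left' (by simp)]
      have hsep : PySem.Chars.findFrom (a ++ '_' :: t) ['_']
          (PySem.Chars.find (a ++ '_' :: t) ['_'] + 1) = -1 := by
        rw [h1, PySem.Chars.findFrom_natCast _ ['_'] (a.length + 1) (by simp)]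
        simp [hdrop, pv_find_no h2]
      simp only [hsep]
      have hcount : (a ++ '_' :: t).count '_' < 2 := by
        simp [List.count_append, List.count_eq_zero.mpr ha, List.count_eq_zero.mpr h2]
      exact pv_loopA_small hcount _ pv_platforms_twotok
    · -- at least two underscores: platform is the two-token prefix on both sides
      have hf : PySem.Chars.find (a ++ '_' :: (b ++ '_' :: r)) ['_'] = (a.length : Int) :=
        pv_find_at a _ ha
      have h1 : PySem.Chars.find (a ++ '_' :: (b ++ '_' :: r)) ['_'] + 1
          = ((a.length + 1 : Nat) : Int) := by rw [hf]; push_cast; ring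
      have hdrop1 : List.drop (a.length + 1) (a ++ '_' :: (b ++ '_' :: r)) = b ++ '_' :: r := by
        have : a ++ '_' :: (b ++ '_' :: r) = (a ++ ['_']) ++ (b ++ '_' :: r) := by simp
        rw [this, List.drop_left' (by simp)]
      have hsep : PySem.Chars.findFrom (a ++ '_' :: (b ++ '_' :: r)) ['_']
          (PySem.Chars.find (a ++ '_' :: (b ++ '_' :: r)) ['_'] + 1)
          = ((a.length + 1 + b.length : Nat) : Int) := by
        rw [h1, PySem.Chars.findFrom_natCast _ ['_'] (a.length + 1) (by simp)]
        rw [hdrop1, pv_find_at b r hb]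
        have hne : ((b.length : Int)) ≠ -1 := by omega
        rw [if_neg hne]
        push_cast
        ring
      have hsep_ne : ((a.length + 1 + b.length : Nat) : Int) ≠ -1 := by omega
      have htake : PySem.Chars.slice (a ++ '_' :: (b ++ '_' :: r)) none
          (some ((a.length + 1 + b.length : Nat) : Int)) = a ++ '_' :: b := by
        rw [PySem.Chars.slice_eq_listSlice, PySem.List.slice_to _ (by positivity)]
        have hsplit : a ++ '_' :: (b ++ '_' :: r) = (a ++ '_' :: b) ++ ('_' :: r) := by simp
        rw [hsplit]
        have hl : ((a.length + 1 + b.length : Nat) : Int).toNat = (a ++ '_' :: b).length := by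
          simp
          omega
        rw [hl, List.take_left]
      have hdrop2 : PySem.Chars.slice (a ++ '_' :: (b ++ '_' :: r))
          (some (((a.length + 1 + b.length : Nat) : Int) + 1)) none = r := by
        rw [PySem.Chars.slice_eq_listSlice]
        have : (((a.length + 1 + b.length : Nat) : Int) + 1) = ((a.length + 1 + b.length + 1 : Nat) : Int) := by
          push_cast; ring
        rw [this, PySem.List.slice_from _ (by positivity)]
        have hsplit : a ++ '_' :: (b ++ '_' :: r) = (a ++ '_' :: b ++ ['_']) ++ r := by simp
        rw [hsplit]
        have hl : ((a.length + 1 + b.length + 1 : Nat) : Int).toNat = (a ++ '_' :: b ++ ['_']).length := by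
          simp
          omega
        rw [hl, List.drop_left]
      simp only [hsep, if_neg hsep_ne, htake, hdrop2]
      rw [pv_loopA_two r ha hb pvKnownPlatforms pv_platforms_twotok]
      cases hfind : pvKnownPlatforms.find? (fun p => p.toList == a ++ '_' :: b) with
      | some p =>
        have hbeq := List.find?_some hfind
        have hpeq : p.toList = a ++ '_' :: b := by simpa using hbeq
        have hp2 : String.ofList (a ++ '_' :: b) = p := by rw [← hpeq, String.ofList_toList]
        have hmem : p ∈ pvKnownPlatforms := List.mem_of_find?_eq_some hfind
        have hcont : pvPlatformSet.contains (String.ofList (a ++ '_' :: b)) = true := by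
          rw [hp2]
          exact List.contains_iff_mem.mpr ((PySem.Set.mem_ofList _ _).mpr hmem)
        rw [if_pos hcont, hp2]
      | none =>
        have hnone : ∀ p ∈ pvKnownPlatforms, ¬ (p.toList == a ++ '_' :: b) = true :=
          fun p hp hbeq => by
            have := List.find?_eq_none.mp hfind p hp
            exact this hbeq
        have hcont : ¬ pvPlatformSet.contains (String.ofList (a ++ '_' :: b)) = true := by
          intro hc
          have hmem : String.ofList (a ++ '_' :: b) ∈ pvKnownPlatforms :=
            (PySem.Set.mem_ofList _ _).mp (List.contains_iff_mem.mp hc)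
          exact hnone _ hmem (beq_iff_eq.mpr String.toList_ofList)
        rw [if_neg hcont]

-- ===== VERDICT (by name: the statement is the Claim_ definition above) =====
theorem parse_template_filename_py_spec : Claim_equal_parse_template_filename_py := by
  intro filename _
  unfold Spec_parse_template_filename_py parse_template_filename_py parse_template_filename_py_alt
  by_cases h : PySem.Str.endswith filename ".textfsm" = true
  · rw [if_pos h, if_pos h]
    exact pv_core (PySem.Chars.slice filename.toList none (some (-8)))
  · rw [if_neg h, if_neg h]
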